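-- pv_equiv track=rewrite | github.com/mtyler1059/REU2024QuantumSensing | CommentedPipeline.py | max_integral
-- ===== SOURCE A (Python) =====
-- def max_integral(variances, length):
--     """
--     Find the starting index that maximizes the sum of variances over a given length.
--
--     Parameters:
--     variances: (q,)
--     length: scalar
--
--     Returns:
--     startIndex: list of indices
--     """
--     startIndex = []
--     max_sum = sum(variances[:length])
--     max_index = 0
--     current_sum = max_sum
--
--     for i in range(1, len(variances) - length + 1):
--         current_sum = current_sum - variances[i - 1] + variances[i + length - 1]
--         if current_sum > max_sum:
--             max_sum = current_sum
--             max_index = i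
--
--     startIndex.append(max_index)
--     return startIndex
-- ===== SOURCE B (Python) =====
-- def max_integral(variances, length):
--     """Prefix-sum re-implementation: each window sum is a difference of two
--     prefix sums; track the first index attaining the maximum."""
--     prefix = [0]
--     s = 0
--     for v in variances:
--         s += v
--         prefix.append(s)
--     best = None
--     max_index = 0
--     for i in range(0, len(variances) - length + 1):
--         window = prefix[i + length] - prefix[i]
--         if best is None or window > best:
--             best = window
--             max_index = i
--     return [max_index]
-- ===== Notes on version B (the rewrite author's own statement) =====
-- stated objective: alternative
-- what changed: Replaces the sliding add/subtract update of the running window sum with a prefix-sum array built once, each window sum computed as a difference of two prefix sums.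
import Mathlib
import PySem

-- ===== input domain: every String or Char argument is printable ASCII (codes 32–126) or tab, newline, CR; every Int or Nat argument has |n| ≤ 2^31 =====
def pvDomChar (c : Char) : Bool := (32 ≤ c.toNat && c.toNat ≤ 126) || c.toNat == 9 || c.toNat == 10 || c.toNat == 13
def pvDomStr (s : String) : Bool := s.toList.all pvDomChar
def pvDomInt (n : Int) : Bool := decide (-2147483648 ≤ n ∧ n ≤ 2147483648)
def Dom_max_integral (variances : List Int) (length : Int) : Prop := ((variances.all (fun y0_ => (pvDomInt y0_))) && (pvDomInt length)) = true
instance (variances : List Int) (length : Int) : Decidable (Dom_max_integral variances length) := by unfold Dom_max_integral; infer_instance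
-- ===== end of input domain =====

-- B replaces A's sliding add/subtract window update by a prefix-sum array with
-- window sums as prefix differences (alternative decomposition, same cost).


-- ===== PORT A =====
-- one loop step of A: current_sum = current_sum - variances[i-1] + variances[i+length-1]; update max on strict >
def stepA (variances : List Int) (length : Int) (st : Int × Int × Int) (i : Int) : Int × Int × Int :=
  let current_sum := st.1 - PySem.List.pyGetD variances (i - 1) 0 + PySem.List.pyGetD variances (i + length - 1) 0
  if current_sum > st.2.1 then (current_sum, current_sum, i) else (current_sum, st.2.1, st.2.2)

def max_integral (variances : List Int) (length : Int) : List Int :=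
  let max_sum := (PySem.List.slice variances none (some length)).sum
  let st := (PySem.List.pyRange 1 ((variances.length : Int) - length + 1) 1).foldl
      (stepA variances length) (max_sum, max_sum, 0)
  [st.2.2]

-- ===== PORT B =====
-- prefix list built left to right carrying the running sum s
def buildPrefix (variances : List Int) : List Int :=
  (variances.foldl (fun (p : List Int × Int) v => (p.1 ++ [p.2 + v], p.2 + v)) ([0], 0)).1

-- one loop step of B: window = prefix[i+length] - prefix[i]; 'best is None or window > best'
def stepB (pref : List Int) (length : Int) (st : Option Int × Int) (i : Int) : Option Int × Int :=
  let window := PySem.List.pyGetD pref (i + length) 0 - PySem.List.pyGetD pref i 0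
  match st.1 with
  | none => (some window, i)
  | some b => if window > b then (some window, i) else st

def max_integral_alt (variances : List Int) (length : Int) : List Int :=
  let pref := buildPrefix variances
  let st := (PySem.List.pyRange 0 ((variances.length : Int) - length + 1) 1).foldl
      (stepB pref length) (none, 0)
  [st.2]

-- ===== PRECONDITION & SPEC =====
-- A raises IndexError on every input with length < 0 (its loop indexes past the end), so those are excluded.
def Pre_max_integral (_variances : List Int) (length : Int) : Prop := 0 ≤ length
instance (variances : List Int) (length : Int) : Decidable (Pre_max_integral variances length) := by unfold Pre_max_integral; infer_instance
def pvWitness_max_integral : List Int × Int := ([3, -1, 4, 1], 2)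

def Spec_max_integral (variances : List Int) (length : Int) (out : List Int) : Prop := out = max_integral_alt variances length
instance (variances : List Int) (length : Int) (out : List Int) : Decidable (Spec_max_integral variances length out) := by unfold Spec_max_integral; infer_instance

-- ===== CLAIM (what is proved, stated in full; the proofs are below) =====
def Claim_equal_max_integral : Prop := ∀ (variances : List Int) (length : Int), Dom_max_integral variances length → Pre_max_integral variances length → Spec_max_integral variances length (max_integral variances length)

-- ===== LEMMAS AND PROOFS =====

-- sum of the first k elements
def pfx (vs : List Int) (k : Nat) : Int := (vs.take k).sum

lemma pfx_succ (vs : List Int) (k : Nat) (h : k < vs.length) :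
    pfx vs (k + 1) = pfx vs k + vs[k] := by
  unfold pfx
  rw [List.take_add_one, List.sum_append, List.getElem?_eq_getElem h]
  simp

lemma buildPrefix_gen (vs : List Int) (acc : List Int) (s : Int) :
    vs.foldl (fun (p : List Int × Int) v => (p.1 ++ [p.2 + v], p.2 + v)) (acc, s)
      = (acc ++ (List.range vs.length).map (fun k => s + pfx vs (k + 1)), s + pfx vs vs.length) := by
  induction vs generalizing acc s with
  | nil =>
    simp only [List.foldl_nil, List.length_nil, List.range_zero, List.map_nil,
      List.append_nil, pfx, List.take_nil, List.sum_nil, add_zero]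
  | cons v vs ih =>
    simp only [List.foldl_cons, ih, List.length_cons]
    rw [Prod.mk.injEq]
    refine ⟨?_, ?_⟩
    · have hmap : List.map (fun k => s + pfx (v :: vs) (k + 1)) (List.range (vs.length + 1))
          = (s + v) :: List.map (fun k => s + v + pfx vs (k + 1)) (List.range vs.length) := by
        rw [List.range_succ_eq_map, List.map_cons, List.map_map]
        refine congrArg₂ _ (by simp [pfx]) ?_
        refine List.map_congr_left (fun a _ => ?_)
        have : pfx (v :: vs) (a + 1 + 1) = v + pfx vs (a + 1) := by simp [pfx]
        simp only [Function.comp_apply, this]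
        ring
      rw [hmap, List.append_assoc]
      rfl
    · have : pfx (v :: vs) (vs.length + 1) = v + pfx vs vs.length := by
        simp [pfx, List.take_succ_cons]
      rw [this]; ring

lemma buildPrefix_eq (vs : List Int) :
    buildPrefix vs = (List.range (vs.length + 1)).map (fun k => pfx vs k) := by
  unfold buildPrefix
  rw [buildPrefix_gen]
  rw [List.range_succ_eq_map]
  simp [pfx, List.map_map, Function.comp]

lemma prefix_getD (vs : List Int) (j : Nat) (hj : j ≤ vs.length) :
    PySem.List.pyGetD ((List.range (vs.length + 1)).map (fun k => pfx vs k)) (j : Int) 0 = pfx vs j := by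
  rw [PySem.List.pyGetD_natCast]
  rw [List.getD_eq_getElem?_getD, List.getElem?_map]
  simp [Nat.lt_succ_of_le hj]

-- window sum starting at j
def wsum (vs : List Int) (l j : Nat) : Int := pfx vs (j + l) - pfx vs j

-- joint invariant of A's and B's loops after c iterations of A (c+1 of B)
lemma loop_inv (vs : List Int) (l c : Nat) (hc : c + l ≤ vs.length) :
    ∃ ms mi : Int,
      (PySem.List.pyRange 1 ((c : Int) + 1) 1).foldl (stepA vs (l : Int)) (pfx vs l, pfx vs l, 0)
        = (wsum vs l c, ms, mi)
      ∧ (PySem.List.pyRange 0 ((c : Int) + 1) 1).foldl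
          (stepB ((List.range (vs.length + 1)).map (fun k => pfx vs k)) (l : Int)) (none, 0)
        = (some ms, mi) := by
  induction c with
  | zero =>
    refine ⟨pfx vs l, 0, ?_, ?_⟩
    · rw [PySem.List.pyRange_one_eq_nil (by norm_num)]
      simp [wsum, pfx]
    · rw [PySem.List.pyRange_one_cons (by norm_num), PySem.List.pyRange_one_eq_nil (by norm_num)]
      simp only [List.foldl_cons, List.foldl_nil, stepB, zero_add]
      have h1 := prefix_getD vs l (by omega)
      have h2 : PySem.List.pyGetD ((List.range (vs.length + 1)).map (fun k => pfx vs k)) (0 : Int) 0 = pfx vs 0 := by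
        simpa using prefix_getD vs 0 (by omega)
      rw [h1, h2]
      simp [pfx]
  | succ c ih =>
    push_cast
    obtain ⟨ms, mi, hA, hB⟩ := ih (by omega)
    have hrecur : wsum vs l (c + 1) = wsum vs l c - vs[c]'(by omega) + vs[c + l]'(by omega) := by
      have e1 := pfx_succ vs (c + l) (by omega)
      have e2 := pfx_succ vs c (by omega)
      simp only [wsum]
      have : c + 1 + l = (c + l) + 1 := by omega
      rw [this, e1, e2]
      ring
    refine ⟨if wsum vs l (c + 1) > ms then wsum vs l (c + 1) else ms,
            if wsum vs l (c + 1) > ms then ((c : Int) + 1) else mi, ?_, ?_⟩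
    · have hsplit : PySem.List.pyRange 1 ((c : Int) + 1 + 1) 1
          = PySem.List.pyRange 1 ((c : Int) + 1) 1 ++ [(c : Int) + 1] := by
        rw [PySem.List.pyRange_one_succ_right (by omega)]
      rw [hsplit, List.foldl_append, hA]
      simp only [List.foldl_cons, List.foldl_nil, stepA]
      have g1 : PySem.List.pyGetD vs ((c : Int) + 1 - 1) 0 = vs[c]'(by omega) := by
        have : ((c : Int) + 1 - 1) = ((c : Nat) : Int) := by omega
        rw [this, PySem.List.pyGetD_natCast, List.getD_eq_getElem?_getD,
            List.getElem?_eq_getElem (by omega)]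
        rfl
      have g2 : PySem.List.pyGetD vs ((c : Int) + 1 + (l : Int) - 1) 0 = vs[c + l]'(by omega) := by
        have : ((c : Int) + 1 + (l : Int) - 1) = (((c + l : Nat)) : Int) := by push_cast; omega
        rw [this, PySem.List.pyGetD_natCast, List.getD_eq_getElem?_getD,
            List.getElem?_eq_getElem (by omega)]
        rfl
      simp only [g1, g2]
      rw [← hrecur]
      by_cases h : wsum vs l (c + 1) > ms
      · simp [h]
      · simp [h]
    · have hsplit : PySem.List.pyRange 0 ((c : Int) + 1 + 1) 1
          = PySem.List.pyRange 0 ((c : Int) + 1) 1 ++ [(c : Int) + 1] := by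
        rw [PySem.List.pyRange_one_succ_right (by omega)]
      rw [hsplit, List.foldl_append, hB]
      simp only [List.foldl_cons, List.foldl_nil, stepB]
      have g1 : PySem.List.pyGetD ((List.range (vs.length + 1)).map (fun k => pfx vs k)) ((c : Int) + 1 + (l : Int)) 0 = pfx vs (c + 1 + l) := by
        have : ((c : Int) + 1 + (l : Int)) = (((c + 1 + l : Nat)) : Int) := by push_cast; ring
        rw [this]; exact prefix_getD vs _ (by omega)
      have g2 : PySem.List.pyGetD ((List.range (vs.length + 1)).map (fun k => pfx vs k)) ((c : Int) + 1) 0 = pfx vs (c + 1) := by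
        have : ((c : Int) + 1) = (((c + 1 : Nat)) : Int) := by push_cast; ring
        rw [this]; exact prefix_getD vs _ (by omega)
      simp only [g1, g2]
      have : pfx vs (c + 1 + l) - pfx vs (c + 1) = wsum vs l (c + 1) := rfl
      rw [this]
      by_cases h : wsum vs l (c + 1) > ms
      · simp [h]
      · simp [h]

-- ===== VERDICT (by name: the statement is the Claim_ definition above) =====
theorem max_integral_spec : Claim_equal_max_integral := by
  intro vs length _ hPre
  unfold Spec_max_integral
  obtain ⟨l, rfl⟩ : ∃ l : Nat, length = (l : Int) :=
    ⟨length.toNat, (Int.toNat_of_nonneg hPre).symm⟩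
  simp only [max_integral, max_integral_alt, buildPrefix_eq]
  by_cases h : (l : Int) ≤ (vs.length : Int)
  · have hln : l ≤ vs.length := by exact_mod_cast h
    have hrangeA : ((vs.length : Int) - (l : Int) + 1) = ((vs.length - l : Nat) : Int) + 1 := by
      push_cast [hln]; ring
    have hslice : (PySem.List.slice vs none (some (l : Int))).sum = pfx vs l := by
      rw [PySem.List.slice_to_natCast]; rfl
    obtain ⟨ms, mi, hA, hB⟩ := loop_inv vs l (vs.length - l) (by omega)
    rw [hrangeA, hslice, hA, hB]
  · rw [PySem.List.pyRange_one_eq_nil (show (vs.length : Int) - (l : Int) + 1 ≤ 1 by omega),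
        PySem.List.pyRange_one_eq_nil (show (vs.length : Int) - (l : Int) + 1 ≤ 0 by omega)]
    simp
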